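-- pv_equiv track=rewrite | github.com/GitMonsters/octotetrahedral-agi | arc-puzzle-catalog/re-arc/solves/197c2823/solver.py | transform
-- ===== SOURCE A (Python) =====
-- def transform(grid):
--     grid = [list(row) for row in grid]
--     H, W = len(grid), len(grid[0])
--     from collections import Counter
--
--     # Find separator rows and columns
--     sep_rows = [r for r in range(H) if len(set(grid[r])) == 1]
--     sep_cols = [c for c in range(W) if len(set(grid[r][c] for r in range(H))) == 1]
--
--     # Get cell ranges
--     def get_ranges(seps, total):
--         ranges = []
--         seps = sorted(set(seps))
--         prev = 0
--         for s in seps: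
--             if s > prev:
--                 ranges.append((prev, s))
--             prev = s + 1
--         if prev < total:
--             ranges.append((prev, total))
--         return ranges
--
--     row_ranges = get_ranges(sep_rows, H)
--     col_ranges = get_ranges(sep_cols, W)
--
--     # Find separator and background colors
--     sep_color = grid[sep_rows[0]][0] if sep_rows else (grid[0][sep_cols[0]] if sep_cols else None)
--     flat = [c for row in grid for c in row]
--     non_sep = [c for c in flat if c != sep_color]
--     bg_color = Counter(non_sep).most_common(1)[0][0] if non_sep else Counter(flat).most_common(1)[0][0]
--
--     # Get cell coordinates for a pixel position
--     def get_cell(r, c):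
--         cell_row = cell_col = local_row = local_col = 0
--         for ri, (rs, re) in enumerate(row_ranges):
--             if rs <= r < re:
--                 cell_row = ri
--                 local_row = r - rs
--                 break
--         for ci, (cs, ce) in enumerate(col_ranges):
--             if cs <= c < ce:
--                 cell_col = ci
--                 local_col = c - cs
--                 break
--         return cell_row, cell_col, local_row, local_col
--
--     # Find all marker colors and their positions
--     markers_by_color = {}
--     for r in range(H):
--         for c in range(W):
--             v = grid[r][c]
--             if v != bg_color and v != sep_color:
--                 if v not in markers_by_color:
--                     markers_by_color[v] = []
--                 cell_row, cell_col, local_row, local_col = get_cell(r, c)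
--                 markers_by_color[v].append((cell_row, cell_col, local_row, local_col))
--
--     # For each color, compute bounding box of cells and fill
--     result = [row[:] for row in grid]
--
--     for color, positions in markers_by_color.items():
--         if not positions:
--             continue
--
--         # Group by local position
--         by_local = {}
--         for cell_row, cell_col, local_row, local_col in positions:
--             key = (local_row, local_col)
--             if key not in by_local:
--                 by_local[key] = []
--             by_local[key].append((cell_row, cell_col))
--
--         # For each local position group, find bounding box and fill
--         for (local_row, local_col), cells in by_local.items():
--             min_cr = min(cr for cr, cc in cells)
--             max_cr = max(cr for cr, cc in cells)
--             min_cc = min(cc for cr, cc in cells)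
--             max_cc = max(cc for cr, cc in cells)
--
--             # Fill all cells in bounding box
--             for cr in range(min_cr, max_cr + 1):
--                 for cc in range(min_cc, max_cc + 1):
--                     # Get actual pixel position
--                     r_start, r_end = row_ranges[cr]
--                     c_start, c_end = col_ranges[cc]
--
--                     if local_row < (r_end - r_start) and local_col < (c_end - c_start):
--                         result[r_start + local_row][c_start + local_col] = color
--
--     return [list(row) for row in result]
-- ===== SOURCE B (Python) =====
-- def transform(grid):
--     grid = [list(row) for row in grid]
--     H, W = len(grid), len(grid[0])
--
--     # Separator rows/columns: uniform lines
--     sep_rows = [r for r in range(H) if grid[r] and all(x == grid[r][0] for x in grid[r])]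
--     sep_cols = [c for c in range(W) if all(grid[r][c] == grid[0][c] for r in range(H))]
--
--     def get_ranges(seps, total):
--         ranges = []
--         seps = sorted(set(seps))
--         prev = 0
--         for s in seps:
--             if s > prev:
--                 ranges.append((prev, s))
--             prev = s + 1
--         if prev < total:
--             ranges.append((prev, total))
--         return ranges
--
--     row_ranges = get_ranges(sep_rows, H)
--     col_ranges = get_ranges(sep_cols, W)
--
--     sep_color = grid[sep_rows[0]][0] if sep_rows else (grid[0][sep_cols[0]] if sep_cols else None)
--
--     # Background = most frequent non-separator color, single counting pass + argmax
--     flat = [c for row in grid for c in row]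
--     non_sep = [c for c in flat if c != sep_color]
--     pool = non_sep if non_sep else flat
--     counts = {}
--     for v in pool:
--         counts[v] = counts.get(v, 0) + 1
--     bg_color, best = pool[0], 0
--     for v, n in counts.items():
--         if n > best:
--             bg_color, best = v, n
--
--     # O(1) cell lookup tables: position -> (cell index, local offset)
--     row_cell = [(0, 0)] * H
--     for ri, (rs, re) in enumerate(row_ranges):
--         for r in range(rs, re):
--             row_cell[r] = (ri, r - rs)
--     col_cell = [(0, 0)] * W
--     for ci, (cs, ce) in enumerate(col_ranges):
--         for c in range(cs, ce):
--             col_cell[c] = (ci, c - cs)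
--
--     markers_by_color = {}
--     for r in range(H):
--         for c in range(W):
--             v = grid[r][c]
--             if v != bg_color and v != sep_color:
--                 if v not in markers_by_color:
--                     markers_by_color[v] = []
--                 cell_row, local_row = row_cell[r]
--                 cell_col, local_col = col_cell[c]
--                 markers_by_color[v].append((cell_row, cell_col, local_row, local_col))
--
--     result = [row[:] for row in grid]
--     for color, positions in markers_by_color.items():
--         if not positions:
--             continue
--         by_local = {}
--         for cell_row, cell_col, local_row, local_col in positions:
--             key = (local_row, local_col)
--             if key not in by_local:
--                 by_local[key] = []
--             by_local[key].append((cell_row, cell_col))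
--         for (local_row, local_col), cells in by_local.items():
--             # bounding box of cells in one pass
--             mn_r, mx_r, mn_c, mx_c = cells[0][0], cells[0][0], cells[0][1], cells[0][1]
--             for cr, cc in cells[1:]:
--                 if cr < mn_r: mn_r = cr
--                 if cr > mx_r: mx_r = cr
--                 if cc < mn_c: mn_c = cc
--                 if cc > mx_c: mx_c = cc
--             for cr in range(mn_r, mx_r + 1):
--                 for cc in range(mn_c, mx_c + 1):
--                     r_start, r_end = row_ranges[cr]
--                     c_start, c_end = col_ranges[cc]
--                     if local_row < (r_end - r_start) and local_col < (c_end - c_start):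
--                         result[r_start + local_row][c_start + local_col] = color
--     return [list(row) for row in result]
-- ===== Notes on version B (the rewrite author's own statement) =====
-- stated objective: faster
-- what changed: B replaces A's per-pixel get_cell scan over the row/col range lists by two precomputed position->(cell,offset) lookup tables built in one pass (O(1) per pixel instead of O(H+W)), computes the background colour with a single counting pass plus a first-max fold instead of Counter().most_common(1), tests separator lines with all(x == line[0]) instead of len(set(line))==1, and takes each bounding box in one fold instead of four min/max generator passes.
-- outside the precondition, e.g. on transform([[], [5, 1], [0]]): A returns [[], [5, 1], [0]], B returns [[], [5, 1], [0]]
import Mathlib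
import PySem

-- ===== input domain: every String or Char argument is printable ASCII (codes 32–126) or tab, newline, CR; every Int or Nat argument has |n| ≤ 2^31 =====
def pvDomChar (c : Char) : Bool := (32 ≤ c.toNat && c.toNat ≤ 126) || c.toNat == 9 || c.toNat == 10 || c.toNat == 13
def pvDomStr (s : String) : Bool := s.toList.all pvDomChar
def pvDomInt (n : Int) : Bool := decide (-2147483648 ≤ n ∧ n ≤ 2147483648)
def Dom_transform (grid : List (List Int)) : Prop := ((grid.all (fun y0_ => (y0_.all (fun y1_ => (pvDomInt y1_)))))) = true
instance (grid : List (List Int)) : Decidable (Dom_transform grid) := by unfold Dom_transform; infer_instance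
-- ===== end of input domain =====

-- B replaces A's per-pixel scan of the cell-range lists by precomputed row/col→(cell,offset)
-- lookup tables (plus a one-pass argmax for the background colour and a one-pass bounding box);
-- objective: faster (O(1) cell lookup per pixel instead of O(H+W)).

-- ===== PORT A =====
-- shared helper: Python `get_ranges` (identical text in Source A and Source B)
def pvGetRanges (seps : List Int) (total : Int) : List (Int × Int) :=
  let st := (PySem.List.sorted (PySem.Set.ofList seps) (fun x => x)).foldl
    (fun (st : List (Int × Int) × Int) s =>
      (if st.2 < s then st.1 ++ [(st.2, s)] else st.1, s + 1)) ([], 0)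
  if st.2 < total then st.1 ++ [(st.2, total)] else st.1

-- shared helper: `sep_color = ...` (identical text in Source A and Source B)
def pvSepColor (grid : List (List Int)) (sepRows sepCols : List Int) : Option Int :=
  if sepRows ≠ [] then
    some (PySem.List.pyGetD (PySem.List.pyGetD grid (PySem.List.pyGetD sepRows 0 0) []) 0 0)
  else if sepCols ≠ [] then
    some (PySem.List.pyGetD (PySem.List.pyGetD grid 0 []) (PySem.List.pyGetD sepCols 0 0) 0)
  else none

-- shared helper: the marker-collection double loop (identical in Source A/Source B except the cell lookup,
-- passed in as `cellFn`, returning ((cell_row, local_row), (cell_col, local_col)))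
def pvCollect (grid : List (List Int)) (H W : Int) (bg : Int) (sep : Option Int)
    (cellFn : Int → Int → (Int × Int) × (Int × Int)) :
    PySem.Dict Int (List (Int × Int × Int × Int)) :=
  (PySem.List.pyRange 0 H).foldl (fun d r =>
    (PySem.List.pyRange 0 W).foldl (fun d c =>
      let v := PySem.List.pyGetD (PySem.List.pyGetD grid r []) c 0
      if v ≠ bg ∧ some v ≠ sep then
        let cell := cellFn r c
        d.modify v [] (fun l => l ++ [(cell.1.1, cell.2.1, cell.1.2, cell.2.2)])
      else d) d) PySem.Dict.empty

-- shared helper: the fill loops (identical in Source A/Source B except the bounding-box computation `bbox`)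
def pvFill (grid : List (List Int)) (rowRanges colRanges : List (Int × Int))
    (markers : PySem.Dict Int (List (Int × Int × Int × Int)))
    (bbox : List (Int × Int) → Int × Int × Int × Int) : List (List Int) :=
  markers.items.foldl (fun res p =>
    if p.2 = [] then res
    else
      let byLocal := p.2.foldl
        (fun (d : PySem.Dict (Int × Int) (List (Int × Int))) q =>
          d.modify (q.2.2.1, q.2.2.2) [] (fun l => l ++ [(q.1, q.2.1)])) PySem.Dict.empty
      byLocal.items.foldl (fun res kv =>
        let bb := bbox kv.2
        (PySem.List.pyRange bb.1 (bb.2.1 + 1)).foldl (fun res cr =>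
          (PySem.List.pyRange bb.2.2.1 (bb.2.2.2 + 1)).foldl (fun res cc =>
            let rr := PySem.List.pyGetD rowRanges cr (0, 0)
            let cc' := PySem.List.pyGetD colRanges cc (0, 0)
            if kv.1.1 < rr.2 - rr.1 ∧ kv.1.2 < cc'.2 - cc'.1 then
              PySem.List.pySetD res (rr.1 + kv.1.1)
                (PySem.List.pySetD (PySem.List.pyGetD res (rr.1 + kv.1.1) []) (cc'.1 + kv.1.2) p.1)
            else res) res) res) res) grid

-- A: `len(set(l)) == 1`
def pvSetLen1 (l : List Int) : Bool := (PySem.Set.ofList l).length == 1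

-- A: sep_rows / sep_cols via set-size test
def pvSepRowsA (grid : List (List Int)) : List Int :=
  (PySem.List.pyRange 0 (grid.length : Int)).filter
    (fun r => pvSetLen1 (PySem.List.pyGetD grid r []))

def pvSepColsA (grid : List (List Int)) : List Int :=
  (PySem.List.pyRange 0 ((PySem.List.pyGetD grid 0 []).length : Int)).filter
    (fun c => pvSetLen1 ((PySem.List.pyRange 0 (grid.length : Int)).map
      (fun r => PySem.List.pyGetD (PySem.List.pyGetD grid r []) c 0)))

-- A: the `get_cell` linear scan over the range list (with break; defaults (0,0))
def pvScanCell (ranges : List (Int × Int)) (x : Int) : Int × Int :=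
  ((PySem.List.enumerate ranges).foldl
    (fun (st : (Int × Int) × Bool) p =>
      if st.2 then st
      else if p.2.1 ≤ x ∧ x < p.2.2 then ((p.1, x - p.2.1), true) else st)
    ((0, 0), false)).1

-- A: Counter(xs).most_common(1)[0][0]  (nlargest(1) = stable descending sort, first item)
def pvMostCommon1 (xs : List Int) : Int :=
  (PySem.List.pyGetD (PySem.List.sorted (PySem.Dict.counter xs).items (fun p => p.2) true) 0 (0, 0)).1

def pvBgA (flat : List Int) (sep : Option Int) : Int :=
  let nonSep := flat.filter (fun c => decide (some c ≠ sep))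
  if nonSep ≠ [] then pvMostCommon1 nonSep else pvMostCommon1 flat

-- A: four min/max generator passes over `cells`
def pvBboxA (cells : List (Int × Int)) : Int × Int × Int × Int :=
  (PySem.List.minD (cells.map (fun p => p.1)) (fun x => x) 0,
   PySem.List.maxD (cells.map (fun p => p.1)) (fun x => x) 0,
   PySem.List.minD (cells.map (fun p => p.2)) (fun x => x) 0,
   PySem.List.maxD (cells.map (fun p => p.2)) (fun x => x) 0)

def transform (grid : List (List Int)) : List (List Int) :=
  pvFill grid
    (pvGetRanges (pvSepRowsA grid) (grid.length : Int))
    (pvGetRanges (pvSepColsA grid) ((PySem.List.pyGetD grid 0 []).length : Int))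
    (pvCollect grid (grid.length : Int) ((PySem.List.pyGetD grid 0 []).length : Int)
      (pvBgA grid.flatten (pvSepColor grid (pvSepRowsA grid) (pvSepColsA grid)))
      (pvSepColor grid (pvSepRowsA grid) (pvSepColsA grid))
      (fun r c =>
        (pvScanCell (pvGetRanges (pvSepRowsA grid) (grid.length : Int)) r,
         pvScanCell (pvGetRanges (pvSepColsA grid) ((PySem.List.pyGetD grid 0 []).length : Int)) c)))
    pvBboxA

-- ===== PORT B =====
-- B: `grid[r] and all(x == grid[r][0] for x in grid[r])`
def pvUniform (l : List Int) : Bool := !l.isEmpty && l.all (fun x => x == PySem.List.pyGetD l 0 0)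

def pvSepRowsB (grid : List (List Int)) : List Int :=
  (PySem.List.pyRange 0 (grid.length : Int)).filter
    (fun r => pvUniform (PySem.List.pyGetD grid r []))

def pvSepColsB (grid : List (List Int)) : List Int :=
  (PySem.List.pyRange 0 ((PySem.List.pyGetD grid 0 []).length : Int)).filter
    (fun c => (PySem.List.pyRange 0 (grid.length : Int)).all
      (fun r => PySem.List.pyGetD (PySem.List.pyGetD grid r []) c 0 ==
                PySem.List.pyGetD (PySem.List.pyGetD grid 0 []) c 0))

-- B: the O(1) lookup table `[(0,0)]*total` overwritten per range
def pvBuildCellMap (ranges : List (Int × Int)) (total : Int) : List (Int × Int) :=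
  (PySem.List.enumerate ranges).foldl (fun m p =>
    (PySem.List.pyRange p.2.1 p.2.2).foldl (fun m x => PySem.List.pySetD m x (p.1, x - p.2.1)) m)
    (List.replicate total.toNat (0, 0))

-- B: one counting pass + one argmax pass (first key with maximal count)
def pvBgB (flat : List Int) (sep : Option Int) : Int :=
  let nonSep := flat.filter (fun c => decide (some c ≠ sep))
  let pool := if nonSep ≠ [] then nonSep else flat
  let counts := pool.foldl (fun (d : PySem.Dict Int Int) v => d.insert v (d.getD v 0 + 1)) PySem.Dict.empty
  (counts.items.foldl (fun (st : Int × Int) q => if st.2 < q.2 then q else st)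
    (PySem.List.pyGetD pool 0 0, 0)).1

-- B: single-pass bounding box from cells[0] over cells[1:]
def pvBboxB (cells : List (Int × Int)) : Int × Int × Int × Int :=
  let c0 := PySem.List.pyGetD cells 0 (0, 0)
  (PySem.List.slice cells (some 1) none).foldl
    (fun (bb : Int × Int × Int × Int) p =>
      (if p.1 < bb.1 then p.1 else bb.1,
       if bb.2.1 < p.1 then p.1 else bb.2.1,
       if p.2 < bb.2.2.1 then p.2 else bb.2.2.1,
       if bb.2.2.2 < p.2 then p.2 else bb.2.2.2))
    (c0.1, c0.1, c0.2, c0.2)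

def transform_alt (grid : List (List Int)) : List (List Int) :=
  pvFill grid
    (pvGetRanges (pvSepRowsB grid) (grid.length : Int))
    (pvGetRanges (pvSepColsB grid) ((PySem.List.pyGetD grid 0 []).length : Int))
    (pvCollect grid (grid.length : Int) ((PySem.List.pyGetD grid 0 []).length : Int)
      (pvBgB grid.flatten (pvSepColor grid (pvSepRowsB grid) (pvSepColsB grid)))
      (pvSepColor grid (pvSepRowsB grid) (pvSepColsB grid))
      (fun r c =>
        (PySem.List.pyGetD (pvBuildCellMap (pvGetRanges (pvSepRowsB grid) (grid.length : Int)) (grid.length : Int)) r (0, 0),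
         PySem.List.pyGetD (pvBuildCellMap (pvGetRanges (pvSepColsB grid) ((PySem.List.pyGetD grid 0 []).length : Int)) ((PySem.List.pyGetD grid 0 []).length : Int)) c (0, 0))))
    pvBboxB

-- ===== PRECONDITION & SPEC =====
-- Pre_ excludes: the empty grid, grids with a row shorter than the first row, and all-empty rows
-- (A raises IndexError there); and grids in which every row or every column is uniform while more
-- than two distinct colours occur — there A indexes into an empty cell-range list and raises
-- IndexError whenever a marker pixel exists, and this test (taken over full rows) is conservative,
-- so it also excludes a few degenerate ragged grids that A survives unchanged.
def Pre_transform (grid : List (List Int)) : Prop :=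
  grid ≠ [] ∧
  (∀ row ∈ grid, (grid.headD []).length ≤ row.length) ∧
  grid.flatten ≠ [] ∧
  (((∀ row ∈ grid, row ≠ [] ∧ ∀ x ∈ row, x = row.headD 0) ∨
    (∀ c ∈ List.range (grid.headD []).length, ∀ row ∈ grid, row.getD c 0 = (grid.headD []).getD c 0)) →
   (PySem.Set.ofList grid.flatten).length ≤ 2)
instance (grid : List (List Int)) : Decidable (Pre_transform grid) := by
  unfold Pre_transform; infer_instance

def pvWitness_transform : List (List Int) := [[1, 2], [3, 4]]

def Spec_transform (grid : List (List Int)) (out : List (List Int)) : Prop := out = transform_alt grid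
instance (grid : List (List Int)) (out : List (List Int)) : Decidable (Spec_transform grid out) := by
  unfold Spec_transform; infer_instance

-- ===== CLAIM (what is proved, stated in full; the proofs are below) =====
def Claim_equal_transform : Prop :=
  ∀ (grid : List (List Int)), Dom_transform grid → Pre_transform grid → Spec_transform grid (transform grid)

-- ===== LEMMAS AND PROOFS =====

-- (1) uniform-line test: A's len(set(l))==1 equals B's nonempty-and-all-equal-head
lemma pvSetLen1_cons (a : Int) (t : List Int) : pvSetLen1 (a :: t) = t.all (fun x => x == a) := by
  unfold pvSetLen1
  rw [PySem.Set.ofList_cons]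
  by_cases hall : ∀ x ∈ t, x = a
  · have hd : (PySem.Set.ofList t).discard a = [] := by
      rw [List.eq_nil_iff_forall_not_mem]
      intro y hy
      rw [PySem.Set.mem_discard] at hy
      exact hy.2 (hall y ((PySem.Set.mem_ofList t y).1 hy.1))
    rw [hd]
    have hall' : t.all (fun x => x == a) = true :=
      List.all_eq_true.2 (fun x hx => beq_iff_eq.2 (hall x hx))
    rw [hall']
    rfl
  · push_neg at hall
    obtain ⟨x, hx, hne⟩ := hall
    have hmem : x ∈ (PySem.Set.ofList t).discard a :=
      (PySem.Set.mem_discard _ _ _).2 ⟨(PySem.Set.mem_ofList t x).2 hx, hne⟩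
    have hall' : t.all (fun x => x == a) = false := by
      rw [List.all_eq_false]
      exact ⟨x, hx, by simpa using hne⟩
    rw [hall']
    rcases hdd : (PySem.Set.ofList t).discard a with _ | ⟨b, s⟩
    · rw [hdd] at hmem; simp at hmem
    · simp only [List.length_cons]
      rw [beq_eq_false_iff_ne]
      omega

lemma pvSetLen1_eq_uniform (l : List Int) : pvSetLen1 l = pvUniform l := by
  cases l with
  | nil => rfl
  | cons a t =>
    rw [pvSetLen1_cons]
    unfold pvUniform
    simp [PySem.List.pyGetD_zero_cons]

lemma pvSepRows_eq (grid : List (List Int)) : pvSepRowsA grid = pvSepRowsB grid := by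
  unfold pvSepRowsA pvSepRowsB
  simp only [pvSetLen1_eq_uniform]

lemma pvSepCols_eq (grid : List (List Int)) (h : grid ≠ []) : pvSepColsA grid = pvSepColsB grid := by
  unfold pvSepColsA pvSepColsB
  apply List.filter_congr
  intro c _
  have hH : (0 : Int) < (grid.length : Int) := by
    cases grid
    · exact absurd rfl h
    · simp
  rw [PySem.List.pyRange_one_cons hH]
  simp only [List.map_cons, List.all_cons, pvSetLen1_cons, List.all_map, beq_self_eq_true,
    Bool.true_and]
  rfl

-- (2) background colour: head of the stable descending sort = first-max fold
lemma pvInsertBy_cons (before : (Int × Int) → (Int × Int) → Bool) (x y : Int × Int) (ys : List (Int × Int)) :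
    PySem.List.insertBy before x (y :: ys) =
      if before x y then x :: y :: ys else y :: PySem.List.insertBy before x ys := rfl

lemma pvPyGetD_zero_headD (l : List (Int × Int)) (d : Int × Int) :
    PySem.List.pyGetD l 0 d = l.headD d := by
  cases l with
  | nil => simp [PySem.List.pyGetD, PySem.List.pyGet?]
  | cons x t => rw [PySem.List.pyGetD_zero_cons]; rfl

lemma pvFoldl_insertBy_head (l : List (Int × Int)) :
    ∀ (h : Int × Int) (acc : List (Int × Int)),
      ((l.foldl (fun acc x => PySem.List.insertBy (fun a b => decide (b.2 < a.2)) x acc) (h :: acc)).headD (0, 0))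
        = l.foldl (fun st p => if st.2 < p.2 then p else st) h := by
  induction l with
  | nil => intro h acc; rfl
  | cons x l ih =>
    intro h acc
    simp only [List.foldl_cons, pvInsertBy_cons]
    by_cases hc : h.2 < x.2
    · rw [if_pos (by simpa using hc), if_pos hc]
      exact ih x (h :: acc)
    · rw [if_neg (by simpa using hc), if_neg hc]
      exact ih h (PySem.List.insertBy (fun a b => decide (b.2 < a.2)) x acc)

lemma pvMostCommon_eq_argmax (xs : List Int) (hne : xs ≠ []) :
    pvMostCommon1 xs =
      ((PySem.Dict.counter xs).items.foldl (fun (st : Int × Int) q => if st.2 < q.2 then q else st)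
        (PySem.List.pyGetD xs 0 0, 0)).1 := by
  obtain ⟨a, t, rfl⟩ : ∃ a t, xs = a :: t := by
    cases xs with
    | nil => exact absurd rfl hne
    | cons a t => exact ⟨a, t, rfl⟩
  have hitems : (PySem.Dict.counter (a :: t)).items
      = (a, ((a :: t).count a : Int)) :: ((PySem.Set.ofList t).discard a).map
          (fun k => (k, ((a :: t).count k : Int))) := by
    rw [PySem.Dict.items_counter, PySem.Set.ofList_cons, List.map_cons]
  have hpos : ((0 : Int), (0 : Int)).2 < (a, ((a :: t).count a : Int)).2 := by
    have h2 : 0 < (a :: t).count a := by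
      rw [List.count_cons_self]; omega
    simpa using (by exact_mod_cast h2 : (0 : Int) < ((a :: t).count a : Int))
  unfold pvMostCommon1
  rw [hitems, PySem.List.sorted_rev_eq_foldl_insertBy, List.foldl_cons]
  have hbeta : (fun acc x => PySem.List.insertBy
        (fun p q => decide ((fun p : Int × Int => p.2) q < (fun p : Int × Int => p.2) p)) x acc)
      = (fun acc x => PySem.List.insertBy (fun p q => decide (q.2 < p.2)) x acc) := rfl
  rw [pvPyGetD_zero_headD]
  have hstart : PySem.List.insertBy (fun p q : Int × Int => decide (q.2 < p.2))
      (a, ((a :: t).count a : Int)) [] = [(a, ((a :: t).count a : Int))] := rfl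
  rw [show PySem.List.insertBy (fun p q : Int × Int => decide ((fun p : Int × Int => p.2) q < (fun p : Int × Int => p.2) p))
      (a, ((a :: t).count a : Int)) [] = [(a, ((a :: t).count a : Int))] from rfl]
  rw [pvFoldl_insertBy_head]
  rw [List.foldl_cons, PySem.List.pyGetD_zero_cons, if_pos hpos]

lemma pvBg_eq (flat : List Int) (sep : Option Int) (hne : flat ≠ []) :
    pvBgA flat sep = pvBgB flat sep := by
  simp only [pvBgA, pvBgB, PySem.Dict.foldl_insert_getD_add_one_eq_counter]
  by_cases hn : flat.filter (fun c => decide (some c ≠ sep)) = []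
  · simp only [hn, ne_eq, not_true_eq_false, if_false]
    exact pvMostCommon_eq_argmax flat hne
  · simp only [if_pos hn]
    exact pvMostCommon_eq_argmax _ hn

-- (3) cell lookup: A's linear scan = B's precomputed table, for sorted disjoint ranges
def pvLookupRef (R : List (Int × Int)) (i0 x : Int) : Option (Int × Int) :=
  match R with
  | [] => none
  | p :: R => if p.1 ≤ x ∧ x < p.2 then some (i0, x - p.1) else pvLookupRef R (i0 + 1) x

lemma pvLookupRef_none (R : List (Int × Int)) (x : Int)
    (h : ∀ q ∈ R, ¬(q.1 ≤ x ∧ x < q.2)) : ∀ i0, pvLookupRef R i0 x = none := by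
  induction R with
  | nil => intro i0; rfl
  | cons p R ih =>
    intro i0
    rw [show pvLookupRef (p :: R) i0 x = if p.1 ≤ x ∧ x < p.2 then some (i0, x - p.1)
        else pvLookupRef R (i0 + 1) x from rfl, if_neg (h p List.mem_cons_self)]
    exact ih (fun q hq => h q (List.mem_cons_of_mem p hq)) (i0 + 1)

lemma pvScan_stop (R : List (Int × Int)) (x : Int) :
    ∀ (i0 : Int) (st : (Int × Int) × Bool), st.2 = true →
      (PySem.List.enumerate R i0).foldl
        (fun (st : (Int × Int) × Bool) p =>
          if st.2 then st
          else if p.2.1 ≤ x ∧ x < p.2.2 then ((p.1, x - p.2.1), true) else st) st = st := by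
  induction R with
  | nil => intro i0 st _; rfl
  | cons p R ih =>
    intro i0 st hst
    rw [PySem.List.enumerate_cons, List.foldl_cons, if_pos hst]
    exact ih (i0 + 1) st hst

lemma pvScan_eq_ref (R : List (Int × Int)) (x : Int) :
    pvScanCell R x = (pvLookupRef R 0 x).getD (0, 0) := by
  unfold pvScanCell
  suffices h : ∀ (R : List (Int × Int)) (i0 : Int),
      ((PySem.List.enumerate R i0).foldl
        (fun (st : (Int × Int) × Bool) p =>
          if st.2 then st
          else if p.2.1 ≤ x ∧ x < p.2.2 then ((p.1, x - p.2.1), true) else st) ((0, 0), false)).1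
        = (pvLookupRef R i0 x).getD (0, 0) by
    exact h R 0
  intro R
  induction R with
  | nil => intro i0; rfl
  | cons p R ih =>
    intro i0
    rw [PySem.List.enumerate_cons, List.foldl_cons]
    have hfalse : ((((0 : Int), (0 : Int)), false) : (Int × Int) × Bool).2 = false := rfl
    by_cases hhit : p.1 ≤ x ∧ x < p.2
    · rw [show (if ((((0 : Int), (0 : Int)), false) : (Int × Int) × Bool).2 then ((((0 : Int), (0 : Int)), false) : (Int × Int) × Bool)
          else if (i0, p).2.1 ≤ x ∧ x < (i0, p).2.2 then (((i0, p).1, x - (i0, p).2.1), true) else ((((0 : Int), (0 : Int)), false) : (Int × Int) × Bool))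
          = (((i0, x - p.1), true) : (Int × Int) × Bool) from by
        rw [if_neg (by simp), if_pos hhit]]
      rw [pvScan_stop R x (i0 + 1) ((i0, x - p.1), true) rfl]
      rw [show pvLookupRef (p :: R) i0 x = if p.1 ≤ x ∧ x < p.2 then some (i0, x - p.1)
          else pvLookupRef R (i0 + 1) x from rfl, if_pos hhit]
      rfl
    · rw [show (if ((((0 : Int), (0 : Int)), false) : (Int × Int) × Bool).2 then ((((0 : Int), (0 : Int)), false) : (Int × Int) × Bool)
          else if (i0, p).2.1 ≤ x ∧ x < (i0, p).2.2 then (((i0, p).1, x - (i0, p).2.1), true) else ((((0 : Int), (0 : Int)), false) : (Int × Int) × Bool))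
          = ((((0 : Int), (0 : Int)), false) : (Int × Int) × Bool) from by
        rw [if_neg (by simp), if_neg hhit]]
      rw [ih (i0 + 1)]
      rw [show pvLookupRef (p :: R) i0 x = if p.1 ≤ x ∧ x < p.2 then some (i0, x - p.1)
          else pvLookupRef R (i0 + 1) x from rfl, if_neg hhit]

lemma pvGetRangesAux (total : Int) :
    ∀ (l : List Int) (ranges : List (Int × Int)) (prev : Int),
      l.Pairwise (· < ·) → (∀ s ∈ l, prev ≤ s) → (∀ s ∈ l, s < total) → 0 ≤ prev → prev ≤ total →
      (∀ p ∈ ranges, 0 ≤ p.1 ∧ p.1 < p.2 ∧ p.2 ≤ prev) →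
      ranges.Pairwise (fun p q => p.2 ≤ q.1) →
      (∀ p ∈ (l.foldl (fun (st : List (Int × Int) × Int) s =>
          (if st.2 < s then st.1 ++ [(st.2, s)] else st.1, s + 1)) (ranges, prev)).1,
        0 ≤ p.1 ∧ p.1 < p.2 ∧ p.2 ≤ (l.foldl (fun (st : List (Int × Int) × Int) s =>
          (if st.2 < s then st.1 ++ [(st.2, s)] else st.1, s + 1)) (ranges, prev)).2) ∧
      (l.foldl (fun (st : List (Int × Int) × Int) s =>
          (if st.2 < s then st.1 ++ [(st.2, s)] else st.1, s + 1)) (ranges, prev)).1.Pairwise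
        (fun p q => p.2 ≤ q.1) ∧
      0 ≤ (l.foldl (fun (st : List (Int × Int) × Int) s =>
          (if st.2 < s then st.1 ++ [(st.2, s)] else st.1, s + 1)) (ranges, prev)).2 ∧
      (l.foldl (fun (st : List (Int × Int) × Int) s =>
          (if st.2 < s then st.1 ++ [(st.2, s)] else st.1, s + 1)) (ranges, prev)).2 ≤ total := by
  intro l
  induction l with
  | nil =>
    intro ranges prev _ _ _ h0 htot hr hp
    exact ⟨hr, hp, h0, htot⟩
  | cons s l ih =>
    intro ranges prev hpw hge hlt h0 htot hr hp
    rw [List.pairwise_cons] at hpw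
    rw [List.foldl_cons]
    have hs0 : prev ≤ s := hge s List.mem_cons_self
    have hstot : s < total := hlt s List.mem_cons_self
    by_cases hlt2 : prev < s
    · rw [if_pos hlt2]
      refine ih (ranges ++ [(prev, s)]) (s + 1)
        hpw.2 (fun y hy => by have := hpw.1 y hy; omega)
        (fun y hy => hlt y (List.mem_cons_of_mem s hy))
        (by omega) (by omega) ?_ ?_
      · intro p hp2
        rcases List.mem_append.1 hp2 with h | h
        · have := hr p h; exact ⟨this.1, this.2.1, by omega⟩
        · simp at h
          rw [h]
          exact ⟨h0, by omega, by omega⟩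
      · rw [List.pairwise_append]
        refine ⟨hp, List.pairwise_singleton _ _, ?_⟩
        intro p hp2 q hq
        simp at hq
        rw [hq]
        exact (hr p hp2).2.2
    · rw [if_neg hlt2]
      exact ih ranges (s + 1)
        hpw.2 (fun y hy => by have := hpw.1 y hy; omega)
        (fun y hy => hlt y (List.mem_cons_of_mem s hy))
        (by omega) (by omega)
        (fun p hp2 => by have := hr p hp2; exact ⟨this.1, this.2.1, by omega⟩) hp

lemma pvRangesOK (seps : List Int) (total : Int) (hs : ∀ s ∈ seps, 0 ≤ s ∧ s < total) :
    (∀ p ∈ pvGetRanges seps total, 0 ≤ p.1 ∧ p.1 < p.2 ∧ p.2 ≤ total) ∧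
      (pvGetRanges seps total).Pairwise (fun p q => p.2 ≤ q.1) := by
  by_cases htot0 : 0 ≤ total
  · simp only [pvGetRanges]
    have hpl := PySem.List.sorted_ofList_pairwise_lt (κ := Int) seps
    have hmem : ∀ s ∈ PySem.List.sorted (PySem.Set.ofList seps) (fun x => x), 0 ≤ s ∧ s < total := by
      intro s hsm
      rw [PySem.List.mem_sorted] at hsm
      exact hs s ((PySem.Set.mem_ofList _ _).1 hsm)
    have haux := pvGetRangesAux total (PySem.List.sorted (PySem.Set.ofList seps) (fun x => x)) [] 0
      hpl (fun s hsm => (hmem s hsm).1) (fun s hsm => (hmem s hsm).2) le_rfl htot0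
      (by intro p hp; simp at hp) List.Pairwise.nil
    obtain ⟨hb, hpw, h0, htot⟩ := haux
    by_cases hfin : ((PySem.List.sorted (PySem.Set.ofList seps) (fun x => x)).foldl
        (fun (st : List (Int × Int) × Int) s =>
          (if st.2 < s then st.1 ++ [(st.2, s)] else st.1, s + 1)) ([], 0)).2 < total
    · rw [if_pos hfin]
      constructor
      · intro p hp
        rcases List.mem_append.1 hp with h | h
        · have := hb p h; exact ⟨this.1, this.2.1, by omega⟩
        · simp at h
          rw [h]
          exact ⟨h0, by simpa using hfin, le_rfl⟩
      · rw [List.pairwise_append]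
        refine ⟨hpw, List.pairwise_singleton _ _, ?_⟩
        intro p hp2 q hq
        simp at hq
        rw [hq]
        exact (hb p hp2).2.2
    · rw [if_neg hfin]
      exact ⟨fun p hp => by have := hb p hp; exact ⟨this.1, this.2.1, by omega⟩, hpw⟩
  · have hseps : seps = [] := by
      cases seps with
      | nil => rfl
      | cons s t =>
        exfalso
        have := hs s List.mem_cons_self
        omega
    subst hseps
    have hnil : PySem.List.sorted (PySem.Set.ofList ([] : List Int)) (fun x => x) = [] :=
      (PySem.List.sorted_eq_nil_iff _ _ _).2 rfl
    simp only [pvGetRanges, hnil, List.foldl_nil]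
    rw [if_neg (by omega)]
    exact ⟨by simp, by simp⟩

lemma pvWrite_length (l : List Int) (g : Int → Int × Int) :
    ∀ (m : List (Int × Int)),
      (l.foldl (fun m y => PySem.List.pySetD m y (g y)) m).length = m.length := by
  induction l with
  | nil => intro m; rfl
  | cons y l ih =>
    intro m
    rw [List.foldl_cons, ih, PySem.List.length_pySetD]

lemma pvWrite_read (n : Nat) :
    ∀ (a b : Int) (m : List (Int × Int)) (g : Int → Int × Int) (x : Int),
      (b - a).toNat = n → 0 ≤ a → 0 ≤ x → b ≤ (m.length : Int) →
      ((PySem.List.pyRange a b).foldl (fun m y => PySem.List.pySetD m y (g y)) m).getD x.toNat (0, 0)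
        = if a ≤ x ∧ x < b then g x else m.getD x.toNat (0, 0) := by
  induction n with
  | zero =>
    intro a b m g x hn ha hx hlen
    rw [PySem.List.pyRange_one_eq_nil (by omega)]
    rw [if_neg (by omega)]
    rfl
  | succ n ih =>
    intro a b m g x hn ha hx hlen
    have hab : a < b := by omega
    rw [PySem.List.pyRange_one_cons hab, List.foldl_cons]
    rw [PySem.List.pySetD_of_nonneg _ _ ha]
    rw [ih (a + 1) b (m.set a.toNat (g a)) g x (by omega) (by omega) hx (by simp; omega)]
    by_cases hxa : x = a
    · subst hxa
      rw [if_neg (by omega), if_pos ⟨le_rfl, hab⟩, List.getD_eq_getElem?_getD,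
        List.getElem?_set_self (by omega)]
      rfl
    · by_cases hhit : a ≤ x ∧ x < b
      · rw [if_pos (by omega), if_pos hhit]
      · rw [if_neg (by omega), if_neg hhit, List.getD_eq_getElem?_getD,
          List.getD_eq_getElem?_getD, List.getElem?_set_ne (by omega)]

lemma pvMap_read :
    ∀ (R : List (Int × Int)) (i0 : Int) (m : List (Int × Int)) (x : Int),
      (∀ p ∈ R, 0 ≤ p.1 ∧ p.1 < p.2 ∧ p.2 ≤ (m.length : Int)) →
      R.Pairwise (fun p q => p.2 ≤ q.1) → 0 ≤ x →
      ((PySem.List.enumerate R i0).foldl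
        (fun m q => (PySem.List.pyRange q.2.1 q.2.2).foldl
          (fun m y => PySem.List.pySetD m y (q.1, y - q.2.1)) m) m).getD x.toNat (0, 0)
        = (pvLookupRef R i0 x).getD (m.getD x.toNat (0, 0)) := by
  intro R
  induction R with
  | nil => intro i0 m x _ _ _; rfl
  | cons p R ih =>
    intro i0 m x hb hpw hx
    rw [PySem.List.enumerate_cons, List.foldl_cons]
    have hbp := hb p List.mem_cons_self
    rw [List.pairwise_cons] at hpw
    rw [show (List.foldl (fun m y => PySem.List.pySetD m y ((i0, p).1, y - (i0, p).2.1)) m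
          (PySem.List.pyRange (i0, p).2.1 (i0, p).2.2))
        = (List.foldl (fun y_1 y => PySem.List.pySetD y_1 y (i0, y - p.1)) m
          (PySem.List.pyRange p.1 p.2)) from rfl]
    have hm'len : (List.foldl (fun y_1 y => PySem.List.pySetD y_1 y (i0, y - p.1)) m
        (PySem.List.pyRange p.1 p.2)).length = m.length :=
      pvWrite_length (PySem.List.pyRange p.1 p.2) (fun y => (i0, y - p.1)) m
    rw [ih (i0 + 1) _ x (fun q hq => by
        have := hb q (List.mem_cons_of_mem p hq)
        rw [hm'len]
        exact this) hpw.2 hx]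
    have hwr := pvWrite_read ((p.2 - p.1).toNat) p.1 p.2 m
      (fun y => ((i0 : Int), y - p.1)) x rfl hbp.1 hx hbp.2.2
    rw [hwr]
    by_cases hhit : p.1 ≤ x ∧ x < p.2
    · rw [if_pos hhit]
      rw [pvLookupRef_none R x (fun q hq hqx => by
        have := hpw.1 q hq
        omega) (i0 + 1)]
      rw [show pvLookupRef (p :: R) i0 x = if p.1 ≤ x ∧ x < p.2 then some (i0, x - p.1)
          else pvLookupRef R (i0 + 1) x from rfl, if_pos hhit]
      rfl
    · rw [if_neg hhit]
      rw [show pvLookupRef (p :: R) i0 x = if p.1 ≤ x ∧ x < p.2 then some (i0, x - p.1)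
          else pvLookupRef R (i0 + 1) x from rfl, if_neg hhit]

lemma pvPyGetD_nonneg (l : List (Int × Int)) (x : Int) (d : Int × Int) (h : 0 ≤ x) :
    PySem.List.pyGetD l x d = l.getD x.toNat d := by
  conv_lhs => rw [show x = ((x.toNat : Nat) : Int) from (Int.toNat_of_nonneg h).symm]
  rw [PySem.List.pyGetD_natCast]

lemma pvCell_eq (R : List (Int × Int)) (total x : Int)
    (hb : ∀ p ∈ R, 0 ≤ p.1 ∧ p.1 < p.2 ∧ p.2 ≤ total)
    (hd : R.Pairwise (fun p q => p.2 ≤ q.1))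
    (h0 : 0 ≤ x) (hx : x < total) :
    pvScanCell R x = PySem.List.pyGetD (pvBuildCellMap R total) x (0, 0) := by
  rw [pvScan_eq_ref]
  simp only [pvBuildCellMap]
  have hlen : ((List.replicate total.toNat ((0 : Int), (0 : Int))).length : Int) = total := by
    simp
    omega
  rw [pvPyGetD_nonneg _ x _ h0]
  rw [pvMap_read R 0 (List.replicate total.toNat (0, 0)) x (fun p hp => by
      have := hb p hp
      rw [hlen]
      exact this) hd h0]
  rw [show (List.replicate total.toNat ((0 : Int), (0 : Int))).getD x.toNat (0, 0) = ((0 : Int), (0 : Int)) from by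
    rw [List.getD_eq_getElem?_getD, List.getElem?_replicate]
    split_ifs <;> rfl]

-- (4) bounding box: four min/max passes = one fold
lemma pvBboxFold (t : List (Int × Int)) :
    ∀ (a b d e : Int),
      t.foldl (fun (bb : Int × Int × Int × Int) p =>
        (if p.1 < bb.1 then p.1 else bb.1,
         if bb.2.1 < p.1 then p.1 else bb.2.1,
         if p.2 < bb.2.2.1 then p.2 else bb.2.2.1,
         if bb.2.2.2 < p.2 then p.2 else bb.2.2.2)) (a, b, d, e)
      = ((t.map (fun p => p.1)).foldl min a, (t.map (fun p => p.1)).foldl max b,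
         (t.map (fun p => p.2)).foldl min d, (t.map (fun p => p.2)).foldl max e) := by
  induction t with
  | nil => intro a b d e; rfl
  | cons p t ih =>
    intro a b d e
    rw [List.foldl_cons, ih]
    simp only [List.map_cons, List.foldl_cons]
    have h1 : (if p.1 < a then p.1 else a) = min a p.1 := by rw [min_def]; split_ifs <;> omega
    have h2 : (if b < p.1 then p.1 else b) = max b p.1 := by rw [max_def]; split_ifs <;> omega
    have h3 : (if p.2 < d then p.2 else d) = min d p.2 := by rw [min_def]; split_ifs <;> omega
    have h4 : (if e < p.2 then p.2 else e) = max e p.2 := by rw [max_def]; split_ifs <;> omega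
    rw [h1, h2, h3, h4]

lemma pvBbox_eq (cells : List (Int × Int)) (h : cells ≠ []) : pvBboxA cells = pvBboxB cells := by
  obtain ⟨c, t, rfl⟩ : ∃ c t, cells = c :: t := by
    cases cells with
    | nil => exact absurd rfl h
    | cons c t => exact ⟨c, t, rfl⟩
  simp only [pvBboxA, pvBboxB, PySem.List.slice_from_one, List.tail_cons,
    PySem.List.pyGetD_zero_cons, List.map_cons, PySem.List.minD_id_cons, PySem.List.maxD_id_cons]
  rw [pvBboxFold]

-- (5) values of the by_local grouping dict are never empty
lemma pvByLocal_ne (positions : List (Int × Int × Int × Int)) :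
    ∀ kv ∈ (positions.foldl
      (fun (d : PySem.Dict (Int × Int) (List (Int × Int))) q =>
        d.modify (q.2.2.1, q.2.2.2) [] (fun l => l ++ [(q.1, q.2.1)])) PySem.Dict.empty).items,
      kv.2 ≠ [] := by
  intro kv hkv
  have hfold : positions.foldl
      (fun (d : PySem.Dict (Int × Int) (List (Int × Int))) q =>
        d.modify (q.2.2.1, q.2.2.2) [] (fun l => l ++ [(q.1, q.2.1)])) PySem.Dict.empty
      = (positions.map (fun q => (((q.2.2.1, q.2.2.2) : Int × Int), ((q.1, q.2.1) : Int × Int)))).foldl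
          (fun d p => d.modify p.1 [] (fun l => l ++ [p.2])) PySem.Dict.empty := by
    rw [List.foldl_map]
  rw [hfold] at hkv
  have hnd : ((positions.map (fun q => (((q.2.2.1, q.2.2.2) : Int × Int), ((q.1, q.2.1) : Int × Int)))).foldl
      (fun d p => d.modify p.1 [] (fun l => l ++ [p.2])) PySem.Dict.empty).keys.Nodup :=
    PySem.Dict.nodup_keys_foldl_modify_key _ Prod.fst [] (fun _ p v => v ++ [p.2]) PySem.Dict.empty (by simp)
  rw [PySem.Dict.items_eq_map_keys _ hnd []] at hkv
  obtain ⟨k, hkmem, hkeq⟩ := List.mem_map.1 hkv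
  rw [PySem.Dict.keys_foldl_modify_key] at hkmem
  have hkmem' : k ∈ PySem.Set.ofList ((positions.map (fun q => (((q.2.2.1, q.2.2.2) : Int × Int), ((q.1, q.2.1) : Int × Int)))).map Prod.fst) := by
    rw [← PySem.Set.update_nil_left]
    simpa using hkmem
  rw [PySem.Set.mem_ofList] at hkmem'
  obtain ⟨q, hq, hq1⟩ := List.mem_map.1 hkmem'
  rw [← hkeq]
  simp only [PySem.Dict.getD_foldl_modify_append, PySem.Dict.getD_empty, List.nil_append, ne_eq,
    List.map_eq_nil_iff, List.filter_eq_nil_iff]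
  intro hcon
  exact hcon q hq (by simp [hq1])

-- (6) congruences
lemma pvCollect_congr (grid : List (List Int)) (H W : Int) (bg : Int) (sep : Option Int)
    (f g : Int → Int → (Int × Int) × (Int × Int))
    (h : ∀ r c, 0 ≤ r → r < H → 0 ≤ c → c < W → f r c = g r c) :
    pvCollect grid H W bg sep f = pvCollect grid H W bg sep g := by
  unfold pvCollect
  apply PySem.List.foldl_congr_mem
  intro d r hr
  apply PySem.List.foldl_congr_mem
  intro d' c hc
  rw [PySem.List.mem_pyRange_one] at hr hc
  simp only [h r c hr.1 hr.2 hc.1 hc.2]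

lemma pvFill_congr (grid : List (List Int)) (rR cR : List (Int × Int))
    (markers : PySem.Dict Int (List (Int × Int × Int × Int)))
    (b1 b2 : List (Int × Int) → Int × Int × Int × Int)
    (h : ∀ cells, cells ≠ [] → b1 cells = b2 cells) :
    pvFill grid rR cR markers b1 = pvFill grid rR cR markers b2 := by
  unfold pvFill
  apply PySem.List.foldl_congr_mem
  intro res p _
  by_cases hnil : p.2 = []
  · simp [hnil]
  · simp only [if_neg hnil]
    apply PySem.List.foldl_congr_mem
    intro res' kv hkv
    have := pvByLocal_ne p.2 kv hkv
    rw [h kv.2 this]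

-- ===== VERDICT (by name: the statement is the Claim_ definition above) =====
theorem transform_spec : Claim_equal_transform := by
  intro grid _hdom hpre
  obtain ⟨h1, _h2, hflat, _h4⟩ := hpre
  have hrow := pvRangesOK (pvSepRowsB grid) (grid.length : Int) (by
    intro s hs
    simp only [pvSepRowsB] at hs
    exact PySem.List.mem_pyRange_one.1 (List.mem_filter.1 hs).1)
  have hcol := pvRangesOK (pvSepColsB grid) ((PySem.List.pyGetD grid 0 []).length : Int) (by
    intro s hs
    simp only [pvSepColsB] at hs
    exact PySem.List.mem_pyRange_one.1 (List.mem_filter.1 hs).1)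
  have hcoll := pvCollect_congr grid (grid.length : Int) ((PySem.List.pyGetD grid 0 []).length : Int)
    (pvBgB grid.flatten (pvSepColor grid (pvSepRowsB grid) (pvSepColsB grid)))
    (pvSepColor grid (pvSepRowsB grid) (pvSepColsB grid))
    (fun r c =>
      (pvScanCell (pvGetRanges (pvSepRowsB grid) (grid.length : Int)) r,
       pvScanCell (pvGetRanges (pvSepColsB grid) ((PySem.List.pyGetD grid 0 []).length : Int)) c))
    (fun r c =>
      (PySem.List.pyGetD (pvBuildCellMap (pvGetRanges (pvSepRowsB grid) (grid.length : Int)) (grid.length : Int)) r (0, 0),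
       PySem.List.pyGetD (pvBuildCellMap (pvGetRanges (pvSepColsB grid) ((PySem.List.pyGetD grid 0 []).length : Int)) ((PySem.List.pyGetD grid 0 []).length : Int)) c (0, 0)))
    (fun r c hr1 hr2 hc1 hc2 => by
      show (pvScanCell (pvGetRanges (pvSepRowsB grid) (grid.length : Int)) r,
            pvScanCell (pvGetRanges (pvSepColsB grid) ((PySem.List.pyGetD grid 0 []).length : Int)) c)
          = (PySem.List.pyGetD (pvBuildCellMap (pvGetRanges (pvSepRowsB grid) (grid.length : Int)) (grid.length : Int)) r (0, 0),
             PySem.List.pyGetD (pvBuildCellMap (pvGetRanges (pvSepColsB grid) ((PySem.List.pyGetD grid 0 []).length : Int)) ((PySem.List.pyGetD grid 0 []).length : Int)) c (0, 0))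
      rw [pvCell_eq _ _ r hrow.1 hrow.2 hr1 hr2, pvCell_eq _ _ c hcol.1 hcol.2 hc1 hc2])
  unfold Spec_transform transform transform_alt
  rw [pvSepRows_eq, pvSepCols_eq grid h1, pvBg_eq _ _ hflat, hcoll]
  exact pvFill_congr _ _ _ _ _ _ pvBbox_eq
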